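-- pv_equiv track=rewrite | github.com/jgabielb/OdooTMFOpenAPI | tmf_user_role_permission/controllers/main_controller.py | _patch_merge
-- ===== SOURCE A (Python) =====
-- def _patch_merge(existing_payload, patch_payload):
--     merged = dict(existing_payload)
--     for k, v in patch_payload.items():
--         if v is None:
--             merged.pop(k, None)
--         else:
--             merged[k] = v
--     return merged
-- ===== SOURCE B (Python) =====
-- def _patch_merge(existing_payload, patch_payload):
--     kept = {k: (patch_payload[k] if k in patch_payload else v)
--             for k, v in existing_payload.items()
--             if not (k in patch_payload and patch_payload[k] is None)}
--     added = {k: v for k, v in patch_payload.items()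
--              if v is not None and k not in existing_payload}
--     return {**kept, **added}
-- ===== Notes on version B (the rewrite author's own statement) =====
-- stated objective: alternative
-- what changed: A iterates the patch, imperatively mutating a copy of the existing dict (pop on None, assign otherwise); B never updates a merged dict: it computes the surviving existing keys by a per-key patch lookup (keeping the patched or original value), separately collects the brand-new non-None patch keys, and concatenates the two disjoint pieces.
import Mathlib
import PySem

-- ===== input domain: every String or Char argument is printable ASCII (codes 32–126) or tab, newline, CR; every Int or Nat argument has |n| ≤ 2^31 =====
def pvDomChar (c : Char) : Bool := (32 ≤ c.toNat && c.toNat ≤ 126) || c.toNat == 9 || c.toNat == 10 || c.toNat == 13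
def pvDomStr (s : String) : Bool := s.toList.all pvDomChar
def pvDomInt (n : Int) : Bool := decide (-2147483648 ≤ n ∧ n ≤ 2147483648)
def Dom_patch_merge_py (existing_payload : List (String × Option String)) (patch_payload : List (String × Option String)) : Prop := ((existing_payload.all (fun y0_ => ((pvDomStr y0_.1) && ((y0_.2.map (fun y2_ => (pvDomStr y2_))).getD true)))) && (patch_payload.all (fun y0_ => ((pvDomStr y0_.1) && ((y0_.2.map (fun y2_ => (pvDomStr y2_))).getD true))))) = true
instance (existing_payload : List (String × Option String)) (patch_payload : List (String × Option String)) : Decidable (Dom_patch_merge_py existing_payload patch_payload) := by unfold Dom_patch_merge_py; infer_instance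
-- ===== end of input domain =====

-- B replaces A's imperative update of a merged-dict copy by two independent lookup passes
-- (surviving existing keys with their patched value, then brand-new non-None patch keys) that are
-- concatenated; same cost, genuinely different decomposition.  No argument is mutated by either program.

-- ===== PORT A =====
-- merged = dict(existing_payload); for k, v in patch_payload.items():
--   if v is None: merged.pop(k, None)  ('pop' with a default just removes the key: Dict.erase)
--   else: merged[k] = v
-- return merged
def patch_merge_py (existing_payload : List (String × Option String)) (patch_payload : List (String × Option String)) : List (String × Option String) :=
  let merged : PySem.Dict String (Option String) := PySem.Dict.ofList existing_payload
  ((PySem.Dict.ofList patch_payload).items.foldl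
    (fun m kv => if kv.2 = none then m.erase kv.1 else m.insert kv.1 kv.2) merged).items

-- ===== PORT B =====
-- kept = {k: (patch[k] if k in patch else v) for k, v in existing.items()
--         if not (k in patch and patch[k] is None)}
-- added = {k: v for k, v in patch.items() if v is not None and k not in existing}
-- return {**kept, **added}
-- The two dict comprehensions run over the items of the two input dicts, whose keys are distinct,
-- and never produce a key twice, so each comprehension IS the filtered/mapped item list below;
-- kept's keys are existing keys while added's keys are not, so {**kept, **added} is their
-- concatenation.  The ports of the comprehensions below are exact on every input.
def patch_merge_py_alt (existing_payload : List (String × Option String)) (patch_payload : List (String × Option String)) : List (String × Option String) :=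
  let ed : PySem.Dict String (Option String) := PySem.Dict.ofList existing_payload
  let pd : PySem.Dict String (Option String) := PySem.Dict.ofList patch_payload
  let kept := ed.items.filterMap (fun kv =>
    if pd.get? kv.1 = some none then none
    else some (kv.1, match pd.get? kv.1 with | some w => w | none => kv.2))
  let added := pd.items.filter (fun kv => !(kv.2 == none) && !(ed.contains kv.1))
  kept ++ added

-- ===== PRECONDITION & SPEC =====
def Spec_patch_merge_py (existing_payload : List (String × Option String)) (patch_payload : List (String × Option String)) (out : List (String × Option String)) : Prop := out = patch_merge_py_alt existing_payload patch_payload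
instance (existing_payload : List (String × Option String)) (patch_payload : List (String × Option String)) (out : List (String × Option String)) : Decidable (Spec_patch_merge_py existing_payload patch_payload out) := by unfold Spec_patch_merge_py; infer_instance

-- ===== CLAIM (what is proved, stated in full; the proofs are below) =====
def Claim_equal_patch_merge_py : Prop := ∀ (existing_payload : List (String × Option String)) (patch_payload : List (String × Option String)), Dom_patch_merge_py existing_payload patch_payload → Spec_patch_merge_py existing_payload patch_payload (patch_merge_py existing_payload patch_payload)

-- ===== LEMMAS AND PROOFS =====

-- abbreviation for B's per-existing-entry transform, with the (rest of the) patch as a literal list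
def pvF (l : List (String × Option String)) (kv : String × Option String) : Option (String × Option String) :=
  if (PySem.Dict.mk l).get? kv.1 = some none then none
  else some (kv.1, match (PySem.Dict.mk l).get? kv.1 with | some w => w | none => kv.2)

-- erase at the items level (definitional)
lemma pv_items_erase (d : PySem.Dict String (Option String)) (k : String) :
    (d.erase k).items = d.items.filter (fun p => !(p.1 == k)) := rfl

-- a filterMap whose function starts with a pruning guard = filter then filterMap
lemma pv_filterMap_guard (l : List (String × Option String)) (p : String × Option String → Bool)
    (h : String × Option String → Option (String × Option String)) :
    l.filterMap (fun x => if p x then none else h x)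
      = (l.filter (fun x => !p x)).filterMap h := by
  induction l with
  | nil => rfl
  | cons a t ih =>
    by_cases ha : p a = true <;>
      simp [List.filterMap_cons, ha, ih]

-- erasing another key does not change membership of a key
lemma pv_contains_erase (d : PySem.Dict String (Option String)) (k k1 : String) (h : k1 ≠ k) :
    (d.erase k).contains k1 = d.contains k1 := by
  simp only [PySem.Dict.contains, PySem.Dict.erase]
  induction d.items with
  | nil => rfl
  | cons a t ih =>
    by_cases ha : a.1 = k
    · simp [ha, Ne.symm h, ih]
    · simp [ha, ih]

-- keys of an erase stay nodup
lemma pv_nodup_erase (d : PySem.Dict String (Option String)) (k : String)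
    (h : d.keys.Nodup) : (d.erase k).keys.Nodup := by
  have he : (d.erase k).keys = d.keys.filter (fun x => !(x == k)) := by
    simp [PySem.Dict.keys, PySem.Dict.erase, List.filter_map]
    rfl
  rw [he]; exact h.filter _

-- a key absent from the item list is not found
lemma pv_get?_mk_none (t : List (String × Option String)) (k : String)
    (h : k ∉ t.map Prod.fst) : (PySem.Dict.mk t).get? k = none := by
  simp [PySem.Dict.get?, List.find?_eq_none]
  intro a b hmem hb
  exact h (List.mem_map.mpr ⟨(a, b), hmem, by simpa using hb⟩)

-- main invariant: A's prune-during-pass fold over l, started from any nodup-key dict d,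
-- produces B's two pieces: d's surviving entries (looked up in l) ++ l's fresh non-None entries
lemma pv_main (l : List (String × Option String)) :
    ∀ d : PySem.Dict String (Option String), d.keys.Nodup → (l.map Prod.fst).Nodup →
    (l.foldl (fun m kv => if kv.2 = none then m.erase kv.1 else m.insert kv.1 kv.2) d).items
      = d.items.filterMap (pvF l)
        ++ l.filter (fun kv => !(kv.2 == none) && !(d.contains kv.1)) := by
  induction l with
  | nil =>
    intro d _ _
    simp [pvF, PySem.Dict.get?]
  | cons a t ih =>
    obtain ⟨ak, av⟩ := a
    intro d hd hl
    rw [List.map_cons, List.nodup_cons] at hl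
    have hat : ak ∉ t.map Prod.fst := hl.1
    have hgt : (PySem.Dict.mk t).get? ak = none := pv_get?_mk_none t ak hat
    have hcongr : ∀ kv : String × Option String, kv.1 ≠ ak → pvF ((ak, av) :: t) kv = pvF t kv := by
      intro kv hne
      simp [pvF, PySem.Dict.get?_mk_cons, show (ak == kv.1) = false by simp [Ne.symm hne]]
    simp only [List.foldl_cons]
    by_cases hv : av = none
    · -- pop branch: erase ak, the entry (ak, av) contributes nothing
      rw [if_pos hv, ih (d.erase ak) (pv_nodup_erase d ak hd) hl.2]
      have h1 : d.items.filterMap (pvF ((ak, av) :: t))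
          = (d.erase ak).items.filterMap (pvF t) := by
        rw [pv_items_erase]
        have hstep : d.items.filterMap (pvF ((ak, av) :: t))
            = d.items.filterMap (fun kv => if kv.1 == ak then none else pvF t kv) := by
          apply List.filterMap_congr
          intro kv _
          by_cases hk : kv.1 = ak
          · simp [pvF, PySem.Dict.get?_mk_cons, hk, hv]
          · simp [show (kv.1 == ak) = false by simp [hk], hcongr kv hk]
        rw [hstep, pv_filterMap_guard]
      have h2 : t.filter (fun kv => !(kv.2 == none) && !((d.erase ak).contains kv.1))
          = t.filter (fun kv => !(kv.2 == none) && !(d.contains kv.1)) := by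
        apply List.filter_congr
        intro kv hkv
        have hne : kv.1 ≠ ak := by
          intro he; exact hat (he ▸ List.mem_map.mpr ⟨kv, hkv, rfl⟩)
        rw [pv_contains_erase d ak kv.1 hne]
      rw [h1, h2, List.filter_cons_of_neg (by simp [hv])]
    · -- assign branch: insert ak av
      rw [if_neg hv, ih (d.insert ak av) (PySem.Dict.nodup_keys_insert d ak av hd) hl.2]
      have h2 : t.filter (fun kv => !(kv.2 == none) && !((d.insert ak av).contains kv.1))
          = t.filter (fun kv => !(kv.2 == none) && !(d.contains kv.1)) := by
        apply List.filter_congr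
        intro kv hkv
        have hne : kv.1 ≠ ak := by
          intro he; exact hat (he ▸ List.mem_map.mpr ⟨kv, hkv, rfl⟩)
        rw [PySem.Dict.contains_insert]
        simp [show (kv.1 == ak) = false by simp [hne]]
      cases hc : d.contains ak with
      | true =>
        rw [PySem.Dict.items_insert_of_contains d av hc, List.filterMap_map, h2]
        have h1 : d.items.filterMap
              ((pvF t) ∘ (fun p => if (p.1 == ak) = true then (ak, av) else p))
            = d.items.filterMap (pvF ((ak, av) :: t)) := by
          apply List.filterMap_congr
          intro kv _
          by_cases hk : kv.1 = ak
          · simp only [Function.comp_apply, hk, beq_self_eq_true, if_pos]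
            simp [pvF, PySem.Dict.get?_mk_cons, hgt, hk, hv]
          · simp only [Function.comp_apply, show (kv.1 == ak) = false by simp [hk],
              Bool.false_eq_true, if_false]
            exact (hcongr kv hk).symm
        rw [h1, List.filter_cons_of_neg (by simp [hc])]
      | false =>
        rw [PySem.Dict.items_insert_of_not_contains d av hc, List.filterMap_append, h2]
        have hnotin : ak ∉ d.items.map Prod.fst := by
          intro hm
          have : d.contains ak = true := by
            rcases List.mem_map.mp hm with ⟨p, hp, hpk⟩
            simp only [PySem.Dict.contains, List.any_eq_true]
            exact ⟨p, hp, by simpa using hpk⟩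
          simp [this] at hc
        have h1 : d.items.filterMap (pvF t) = d.items.filterMap (pvF ((ak, av) :: t)) := by
          apply List.filterMap_congr
          intro kv hkv
          have hne : kv.1 ≠ ak := by
            intro he; exact hnotin (he ▸ List.mem_map.mpr ⟨kv, hkv, rfl⟩)
          exact (hcongr kv hne).symm
        have h3 : [((ak : String), (av : Option String))].filterMap (pvF t) = [(ak, av)] := by
          simp [pvF, hgt]
        rw [h1, h3, List.filter_cons_of_pos (by simp [hc, Option.isSome_iff_ne_none, hv])]
        simp [List.append_assoc]

-- ===== VERDICT (by name: the statement is the Claim_ definition above) =====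
theorem patch_merge_py_spec : Claim_equal_patch_merge_py := by
  intro e p _
  unfold Spec_patch_merge_py patch_merge_py patch_merge_py_alt
  have hd : (PySem.Dict.ofList e : PySem.Dict String (Option String)).keys.Nodup :=
    PySem.Dict.nodup_keys_ofList e
  have hp : (((PySem.Dict.ofList p : PySem.Dict String (Option String)).items.map Prod.fst)).Nodup := by
    have := PySem.Dict.nodup_keys_ofList (ν := Option String) p
    simpa [PySem.Dict.keys] using this
  rw [pv_main _ _ hd hp]
  rfl
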